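-- pv_equiv track=rewrite | github.com/daniel-reich/ubiquitous-fiesta | 6LwzPRc6LrauEgr7H_16.py | worm_length
-- ===== SOURCE A (Python) =====
-- def worm_length(worm):
--   if not len(worm): return 'invalid'
--   size = 0
--   for c in worm:
--     if c != '-':
--       return 'invalid'
--     size += 10
--   return str(size) + ' mm.'
-- ===== SOURCE B (Python) =====
-- def worm_length(worm):
--   if set(worm) == {'-'}:
--     return str(len(worm) * 10) + ' mm.'
--   return 'invalid'
-- ===== Notes on version B (the rewrite author's own statement) =====
-- stated objective: simpler
-- what changed: Replaces the validating loop with its running counter by one whole-string set-equality test (the set of characters must equal the singleton dash set, which is false for the empty string and for any non-dash character) and a closed-form length times ten result.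
import Mathlib
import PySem

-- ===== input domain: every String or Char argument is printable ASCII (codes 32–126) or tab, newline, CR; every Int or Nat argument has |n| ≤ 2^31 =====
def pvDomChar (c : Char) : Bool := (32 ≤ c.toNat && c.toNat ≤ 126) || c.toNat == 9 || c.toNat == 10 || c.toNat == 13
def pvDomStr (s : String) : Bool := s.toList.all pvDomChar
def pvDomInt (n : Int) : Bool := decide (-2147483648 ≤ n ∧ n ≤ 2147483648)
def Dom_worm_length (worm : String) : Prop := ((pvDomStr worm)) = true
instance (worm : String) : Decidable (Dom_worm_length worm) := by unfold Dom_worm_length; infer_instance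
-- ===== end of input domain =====

-- B replaces A's validating/accumulating loop by a whole-string set test and a closed-form length*10 (simpler).

-- ===== PORT A =====
def wormLoopA : List Char → Int → String
  | [], size => PySem.Int.toStr size ++ " mm."
  | c :: cs, size => if c ≠ '-' then "invalid" else wormLoopA cs (size + 10)

def worm_length (worm : String) : String :=
  if PySem.Str.len worm = 0 then "invalid" else wormLoopA worm.toList 0

-- ===== PORT B =====
def worm_length_alt (worm : String) : String :=
  if PySem.Set.equal (PySem.Set.ofList worm.toList) ['-'] then
    PySem.Int.toStr (PySem.Str.len worm * 10) ++ " mm."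
  else "invalid"

-- ===== PRECONDITION & SPEC =====
def Spec_worm_length (worm : String) (out : String) : Prop := out = worm_length_alt worm
instance (worm : String) (out : String) : Decidable (Spec_worm_length worm out) := by unfold Spec_worm_length; infer_instance

-- ===== CLAIM (what is proved, stated in full; the proofs are below) =====
def Claim_equal_worm_length : Prop := ∀ (worm : String), Dom_worm_length worm → Spec_worm_length worm (worm_length worm)

-- ===== LEMMAS AND PROOFS =====

/-- A's loop, characterised: all-dash gives the accumulated size, otherwise "invalid". -/
lemma wormLoopA_char (l : List Char) : ∀ (s : Int),
    wormLoopA l s = if l.all (· = '-') then PySem.Int.toStr (s + 10 * l.length) ++ " mm." else "invalid" := by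
  induction l with
  | nil => intro s; simp [wormLoopA]
  | cons c cs ih =>
    intro s
    by_cases hc : c = '-'
    · simp [wormLoopA, hc, ih (s + 10)]
      split_ifs <;> [skip; rfl]
      congr 2
      omega
    · simp [wormLoopA, hc]

lemma ofList_dash (l : List Char) (h : l.all (· = '-') = true) (hne : l ≠ []) :
    PySem.Set.ofList l = ['-'] := by
  have hsub : PySem.Set.ofList l ⊆ ['-'] := by
    intro x hx
    have := (PySem.Set.mem_ofList _ _).mp hx
    simp only [List.all_eq_true, decide_eq_true_eq] at h
    simp [h x this]
  have hmem : '-' ∈ PySem.Set.ofList l := by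
    obtain ⟨c, hc⟩ := List.exists_mem_of_ne_nil l hne
    simp only [List.all_eq_true, decide_eq_true_eq] at h
    exact (PySem.Set.mem_ofList _ _).mpr (h c hc ▸ hc)
  have hnd := PySem.Set.nodup_ofList (xs := l)
  -- a nodup sublist-as-subset of ['-'] containing '-' is ['-']
  cases hl : PySem.Set.ofList l with
  | nil => rw [hl] at hmem; cases hmem
  | cons a t =>
    rw [hl] at hsub hnd hmem
    have ha : a = '-' := by have := hsub (List.mem_cons_self ..); simpa using this
    have ht : t = [] := by
      cases t with
      | nil => rfl
      | cons b u =>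
        exfalso
        have hb : b = '-' := by
          have := hsub (show b ∈ a :: b :: u by simp)
          simpa using this
        rw [ha, hb] at hnd
        simp at hnd
    rw [ha, ht]

lemma equal_false_of_bad (l : List Char) (h : ¬ (l ≠ [] ∧ l.all (· = '-') = true)) :
    PySem.Set.equal (PySem.Set.ofList l) ['-'] = false := by
  rcases (not_and_or.mp h) with h1 | h2
  · have hl : l = [] := not_not.mp h1
    subst hl
    decide
  · simp only [List.all_eq_true, decide_eq_true_eq] at h2
    push_neg at h2
    obtain ⟨c, hc, hcne⟩ := h2
    by_contra hcontra
    have heq : PySem.Set.equal (PySem.Set.ofList l) ['-'] = true := by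
      cases hb : PySem.Set.equal (PySem.Set.ofList l) ['-'] with
      | false => exact absurd hb hcontra
      | true => rfl
    have := ((PySem.Set.equal_iff _ _).mp heq c).mp ((PySem.Set.mem_ofList _ _).mpr hc)
    simp at this
    exact hcne this

-- ===== VERDICT (by name: the statement is the Claim_ definition above) =====
theorem worm_length_spec : Claim_equal_worm_length := by
  intro worm _
  unfold Spec_worm_length worm_length worm_length_alt
  by_cases hgood : worm.toList ≠ [] ∧ worm.toList.all (· = '-') = true
  · obtain ⟨hne, hall⟩ := hgood
    have hset := ofList_dash _ hall hne
    have hlen0 : PySem.Str.len worm ≠ 0 := by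
      rw [PySem.Str.len_eq]
      intro h
      apply hne
      apply List.length_eq_zero_iff.mp
      omega
    rw [if_neg hlen0, hset]
    have : PySem.Set.equal (['-'] : List Char) ['-'] = true := by decide
    rw [this, if_pos rfl, wormLoopA_char, if_pos hall]
    congr 2
    rw [PySem.Str.len_eq]
    ring
  · have hbad := equal_false_of_bad worm.toList hgood
    rw [hbad]
    simp only [Bool.false_eq_true, if_false]
    rcases not_and_or.mp hgood with h1 | h2
    · have h0 : worm.toList = [] := not_not.mp h1
      have : PySem.Str.len worm = 0 := by rw [PySem.Str.len_eq, h0]; rfl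
      rw [if_pos this]
    · by_cases h0 : worm.toList = []
      · have : PySem.Str.len worm = 0 := by rw [PySem.Str.len_eq, h0]; rfl
        rw [if_pos this]
      · have hne0 : PySem.Str.len worm ≠ 0 := by
          rw [PySem.Str.len_eq]
          intro hl
          apply h0
          apply List.length_eq_zero_iff.mp
          omega
        rw [if_neg hne0, wormLoopA_char, if_neg h2]
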